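-- pv_equiv track=rewrite | github.com/AlexanderJCS/advent-of-code-2023 | day-01/part_2.py | get_num_indices
-- ===== SOURCE A (Python) =====
-- NUM_STRINGS = (
--         [str(i) for i in range(1, 10)]
--         + ["one", "two", "three", "four", "five", "six", "seven", "eight", "nine"]
-- )
--
-- WRITTEN_TO_NUM = {
--     "one": "1",
--     "two": "2",
--     "three": "3",
--     "four": "4",
--     "five": "5",
--     "six": "6",
--     "seven": "7",
--     "eight": "8",
--     "nine": "9"
-- }
--
-- def get_num_indices(string: str) -> list[tuple[int, str]]:
--     indices: list[tuple[int, str]] = []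
--
--     for num_string in NUM_STRINGS:
--         try:
--             first_index = string.index(num_string)
--             last_index = string.rindex(num_string)
--         except ValueError:
--             continue
--
--         num_string_short = WRITTEN_TO_NUM.get(num_string)
--         if num_string_short is None:  # would happen if it's "9" instead of "nine", for example
--             num_string_short = num_string
--
--         indices.append((first_index, num_string_short))
--         if last_index != first_index:
--             indices.append((last_index, num_string_short))
--
--     return indices
-- ===== SOURCE B (Python) =====
-- NUM_STRINGS = (
--         [str(i) for i in range(1, 10)]
--         + ["one", "two", "three", "four", "five", "six", "seven", "eight", "nine"]
-- )
--
-- WRITTEN_TO_NUM = {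
--     "one": "1",
--     "two": "2",
--     "three": "3",
--     "four": "4",
--     "five": "5",
--     "six": "6",
--     "seven": "7",
--     "eight": "8",
--     "nine": "9"
-- }
--
-- def get_num_indices(string: str) -> list[tuple[int, str]]:
--     # One left-to-right scan: record first and last match position of each pattern.
--     occ: dict[str, tuple[int, int]] = {}
--     for i in range(len(string)):
--         for num_string in NUM_STRINGS:
--             if string.startswith(num_string, i):
--                 prev = occ.get(num_string)
--                 occ[num_string] = (i, i) if prev is None else (prev[0], i)
--
--     # Grouped emit pass in NUM_STRINGS order.
--     result: list[tuple[int, str]] = []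
--     for num_string in NUM_STRINGS:
--         pair = occ.get(num_string)
--         if pair is None:
--             continue
--         first, last = pair
--         short = WRITTEN_TO_NUM.get(num_string, num_string)
--         result.append((first, short))
--         if last != first:
--             result.append((last, short))
--     return result
-- ===== Notes on version B (the rewrite author's own statement) =====
-- stated objective: alternative
-- what changed: Replaced the per-pattern directional index/rindex searches with a single left-to-right scan that builds a first/last occurrence table for all patterns at once, followed by a separate grouped emit pass over NUM_STRINGS.
import Mathlib
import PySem

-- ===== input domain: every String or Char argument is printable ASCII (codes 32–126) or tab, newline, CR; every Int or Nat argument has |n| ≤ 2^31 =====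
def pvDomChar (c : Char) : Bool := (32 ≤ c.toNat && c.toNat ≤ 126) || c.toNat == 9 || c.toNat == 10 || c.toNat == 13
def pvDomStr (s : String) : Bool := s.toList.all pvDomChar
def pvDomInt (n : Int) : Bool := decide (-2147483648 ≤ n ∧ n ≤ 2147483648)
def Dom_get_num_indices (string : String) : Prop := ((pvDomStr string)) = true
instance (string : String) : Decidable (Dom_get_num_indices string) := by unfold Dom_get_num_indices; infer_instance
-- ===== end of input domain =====

-- B replaces A's per-pattern index/rindex searches with one left-to-right scan building a
-- first/last occurrence table, then a grouped emit pass (alternative decomposition, same results).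

def NUM_STRINGS : List String :=
  ["1", "2", "3", "4", "5", "6", "7", "8", "9",
   "one", "two", "three", "four", "five", "six", "seven", "eight", "nine"]

def WRITTEN_TO_NUM : PySem.Dict String String :=
  PySem.Dict.ofList
    [("one", "1"), ("two", "2"), ("three", "3"), ("four", "4"), ("five", "5"),
     ("six", "6"), ("seven", "7"), ("eight", "8"), ("nine", "9")]

-- ===== PORT A =====
-- exact port of Python str.index(sub): smallest i with sub a prefix of s[i:], none = ValueError
def firstOcc (pat : List Char) : List Char → Option Nat
  | [] => if pat.isPrefixOf ([] : List Char) then some 0 else none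
  | c :: t => if pat.isPrefixOf (c :: t) then some 0 else (firstOcc pat t).map (· + 1)

-- exact port of Python str.rindex(sub): largest such i, none = ValueError
def lastOcc (pat : List Char) : List Char → Option Nat
  | [] => if pat.isPrefixOf ([] : List Char) then some 0 else none
  | c :: t =>
    match lastOcc pat t with
    | some j => some (j + 1)
    | none => if pat.isPrefixOf (c :: t) then some 0 else none

def get_num_indices (string : String) : List (Int × String) :=
  NUM_STRINGS.foldl (fun indices num_string =>
    match firstOcc num_string.toList string.toList, lastOcc num_string.toList string.toList with
    | some first_index, some last_index =>
        let num_string_short := (WRITTEN_TO_NUM.get? num_string).getD num_string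
        let indices := indices ++ [((first_index : Int), num_string_short)]
        if last_index ≠ first_index then indices ++ [((last_index : Int), num_string_short)]
        else indices
    | _, _ => indices) []  -- except ValueError: continue

-- ===== PORT B =====
-- string.startswith(num_string, i) ported exactly as: num_string is a prefix of s[i:]
def get_num_indices_alt (string : String) : List (Int × String) :=
  let s := string.toList
  let occ : PySem.Dict String (Nat × Nat) :=
    (List.range s.length).foldl (fun occ i =>
      NUM_STRINGS.foldl (fun occ num_string =>
        if num_string.toList.isPrefixOf (s.drop i) then
          occ.insert num_string
            (match occ.get? num_string with
             | none => (i, i)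
             | some prev => (prev.1, i))
        else occ) occ) PySem.Dict.empty
  NUM_STRINGS.foldl (fun result num_string =>
    match occ.get? num_string with
    | none => result
    | some pair =>
        let short := (WRITTEN_TO_NUM.get? num_string).getD num_string
        let result := result ++ [((pair.1 : Int), short)]
        if pair.2 ≠ pair.1 then result ++ [((pair.2 : Int), short)] else result) []

-- ===== PRECONDITION & SPEC =====
def Spec_get_num_indices (string : String) (out : List (Int × String)) : Prop := out = get_num_indices_alt string
instance (string : String) (out : List (Int × String)) : Decidable (Spec_get_num_indices string out) := by unfold Spec_get_num_indices; infer_instance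

-- ===== CLAIM (what is proved, stated in full; the proofs are below) =====
def Claim_equal_get_num_indices : Prop := ∀ (string : String), Dom_get_num_indices string → Spec_get_num_indices string (get_num_indices string)

-- ===== LEMMAS AND PROOFS =====

-- proof-only restatements of B's loops under names
def pvUpd (o : Option (Nat × Nat)) (i : Nat) : Nat × Nat :=
  match o with
  | none => (i, i)
  | some prev => (prev.1, i)

def pvInnerF (s : List Char) (i : Nat) (occ : PySem.Dict String (Nat × Nat)) (ns : String) :
    PySem.Dict String (Nat × Nat) :=
  if ns.toList.isPrefixOf (s.drop i) then occ.insert ns (pvUpd (occ.get? ns) i) else occ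

def pvOccN (s : List Char) (n : Nat) : PySem.Dict String (Nat × Nat) :=
  (List.range n).foldl (fun occ i => NUM_STRINGS.foldl (pvInnerF s i) occ) PySem.Dict.empty

def pvEmit (occ : PySem.Dict String (Nat × Nat)) (result : List (Int × String)) (ns : String) :
    List (Int × String) :=
  match occ.get? ns with
  | none => result
  | some pair =>
      let short := (WRITTEN_TO_NUM.get? ns).getD ns
      let result := result ++ [((pair.1 : Int), short)]
      if pair.2 ≠ pair.1 then result ++ [((pair.2 : Int), short)] else result

lemma pv_alt_eq (string : String) :
    get_num_indices_alt string =
      NUM_STRINGS.foldl (pvEmit (pvOccN string.toList string.toList.length)) [] := rfl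

-- the list of match positions of p in s among 0, …, n-1
def pvPos (s p : List Char) (n : Nat) : List Nat :=
  (List.range n).filter (fun i => p.isPrefixOf (s.drop i))

def pvPair (l : List Nat) : Option (Nat × Nat) :=
  match l.head?, l.getLast? with
  | some a, some b => some (a, b)
  | _, _ => none

lemma pv_nodup : NUM_STRINGS.Nodup := by decide

lemma pv_ne_nil : ∀ ns ∈ NUM_STRINGS, ns.toList ≠ [] := by decide

lemma pv_get_foldl_not_mem (s : List Char) (i : Nat) (L : List String)
    (occ : PySem.Dict String (Nat × Nat)) (ns : String) (h : ns ∉ L) :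
    (L.foldl (pvInnerF s i) occ).get? ns = occ.get? ns := by
  induction L generalizing occ with
  | nil => rfl
  | cons q t ih =>
    simp only [List.mem_cons, not_or] at h
    rw [List.foldl_cons, ih _ h.2]
    unfold pvInnerF
    split_ifs
    · exact PySem.Dict.get?_insert_of_ne _ _ h.1
    · rfl

lemma pv_get_inner (s : List Char) (i : Nat) (L : List String)
    (occ : PySem.Dict String (Nat × Nat)) (ns : String) (hmem : ns ∈ L) (hnd : L.Nodup) :
    (L.foldl (pvInnerF s i) occ).get? ns =
      if ns.toList.isPrefixOf (s.drop i) then some (pvUpd (occ.get? ns) i) else occ.get? ns := by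
  induction L generalizing occ with
  | nil => cases hmem
  | cons q t ih =>
    rw [List.foldl_cons]
    rcases List.nodup_cons.mp hnd with ⟨hqt, hndt⟩
    by_cases hq : ns = q
    · subst hq
      rw [pv_get_foldl_not_mem s i t _ ns hqt]
      unfold pvInnerF
      split_ifs with hp
      · rw [PySem.Dict.get?_insert_self]
      · rfl
    · have hmem' : ns ∈ t := (List.mem_cons.mp hmem).resolve_left hq
      rw [ih _ hmem' hndt]
      have hkeep : (pvInnerF s i occ q).get? ns = occ.get? ns := by
        unfold pvInnerF
        split_ifs
        · exact PySem.Dict.get?_insert_of_ne _ _ hq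
        · rfl
      rw [hkeep]

lemma pvPair_append_singleton (l : List Nat) (j : Nat) :
    pvPair (l ++ [j]) = some (pvUpd (pvPair l) j) := by
  cases l with
  | nil => rfl
  | cons a t =>
    obtain ⟨b, hb⟩ := Option.isSome_iff_exists.mp
      (List.getLast?_isSome.mpr (by simp : (a :: t) ≠ []))
    have hgl : (a :: (t ++ [j])).getLast? = some j := by
      rw [← List.cons_append]; exact List.getLast?_concat
    simp [pvPair, pvUpd, hgl, hb]

lemma pvPos_succ (s p : List Char) (n : Nat) :
    pvPos s p (n + 1) = pvPos s p n ++ (if p.isPrefixOf (s.drop n) then [n] else []) := by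
  simp only [pvPos, List.range_succ, List.filter_append, List.filter_cons, List.filter_nil]

lemma pv_get_outer (s : List Char) (n : Nat) (ns : String) (hmem : ns ∈ NUM_STRINGS) :
    (pvOccN s n).get? ns = pvPair (pvPos s ns.toList n) := by
  induction n with
  | zero => simp [pvOccN, pvPos, pvPair, PySem.Dict.get?_empty]
  | succ n ih =>
    have hstep : pvOccN s (n + 1) = NUM_STRINGS.foldl (pvInnerF s n) (pvOccN s n) := by
      unfold pvOccN
      rw [List.range_succ, List.foldl_append, List.foldl_cons, List.foldl_nil]
    rw [hstep, pv_get_inner s n NUM_STRINGS _ ns hmem pv_nodup, ih, pvPos_succ]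
    split_ifs with hp
    · rw [pvPair_append_singleton]
    · simp

lemma pv_filter_range_cons (p : List Char) (c : Char) (t : List Char) (n : Nat) :
    (List.range (n + 1)).filter (fun i => p.isPrefixOf ((c :: t).drop i)) =
      (if p.isPrefixOf (c :: t) then [0] else []) ++
        ((List.range n).filter (fun i => p.isPrefixOf (t.drop i))).map (· + 1) := by
  rw [List.range_succ_eq_map, List.filter_cons, List.filter_map]
  have hcomp : ((fun i => p.isPrefixOf ((c :: t).drop i)) ∘ Nat.succ)
      = (fun i => p.isPrefixOf (t.drop i)) := by
    funext i; simp [List.drop_succ_cons]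
  rw [hcomp]
  simp only [List.drop_zero]
  split_ifs <;> simp

lemma pv_firstOcc_eq (p : List Char) : ∀ s : List Char,
    firstOcc p s = (pvPos s p (s.length + 1)).head? := by
  intro s
  induction s with
  | nil =>
    have h1 : List.range (([] : List Char).length + 1) = [0] := rfl
    unfold firstOcc
    simp only [pvPos, h1, List.filter_cons, List.filter_nil, List.drop_nil]
    split_ifs <;> rfl
  | cons c t ih =>
    have hdec : pvPos (c :: t) p ((c :: t).length + 1) =
        (if p.isPrefixOf (c :: t) then [0] else []) ++ (pvPos t p (t.length + 1)).map (· + 1) := by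
      simp only [pvPos, List.length_cons]
      exact pv_filter_range_cons p c t (t.length + 1)
    rw [hdec]
    unfold firstOcc
    split_ifs with hp
    · simp
    · simp [ih, List.head?_map]

lemma pv_lastOcc_eq (p : List Char) : ∀ s : List Char,
    lastOcc p s = (pvPos s p (s.length + 1)).getLast? := by
  intro s
  induction s with
  | nil =>
    have h1 : List.range (([] : List Char).length + 1) = [0] := rfl
    unfold lastOcc
    simp only [pvPos, h1, List.filter_cons, List.filter_nil, List.drop_nil]
    split_ifs <;> rfl
  | cons c t ih =>
    have hdec : pvPos (c :: t) p ((c :: t).length + 1) =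
        (if p.isPrefixOf (c :: t) then [0] else []) ++ (pvPos t p (t.length + 1)).map (· + 1) := by
      simp only [pvPos, List.length_cons]
      exact pv_filter_range_cons p c t (t.length + 1)
    rw [hdec]
    unfold lastOcc
    rw [ih]
    cases hcase : pvPos t p (t.length + 1) with
    | nil =>
      simp only [List.map_nil, List.append_nil, List.getLast?_nil]
      split_ifs <;> rfl
    | cons a t' =>
      obtain ⟨b, hb⟩ := Option.isSome_iff_exists.mp
        (List.getLast?_isSome.mpr (by simp : (a :: t') ≠ []))
      have hmap : ((a :: t').map (· + 1)).getLast? = some (b + 1) := by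
        rw [List.getLast?_map, hb]; rfl
      have happ : ((if p.isPrefixOf (c :: t) then [0] else []) ++ (a :: t').map (· + 1)).getLast?
          = some (b + 1) := by
        rw [List.getLast?_append_of_ne_nil _ (by simp), hmap]
      rw [happ, hb]

lemma pv_pos_full (s p : List Char) (hp : p ≠ []) :
    pvPos s p (s.length + 1) = pvPos s p s.length := by
  have hfalse : p.isPrefixOf (List.drop s.length s) = false := by
    rw [List.drop_length]
    cases p with
    | nil => exact absurd rfl hp
    | cons a t => rfl
  rw [pvPos_succ, hfalse]
  simp

-- ===== VERDICT (by name: the statement is the Claim_ definition above) =====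
theorem get_num_indices_spec : Claim_equal_get_num_indices := by
  intro string _
  unfold Spec_get_num_indices
  rw [pv_alt_eq]
  unfold get_num_indices
  apply PySem.List.foldl_congr_mem
  intro acc ns hmem
  unfold pvEmit
  rw [pv_get_outer _ _ _ hmem, ← pv_pos_full _ _ (pv_ne_nil ns hmem)]
  unfold pvPair
  rw [← pv_firstOcc_eq, ← pv_lastOcc_eq]
  cases firstOcc ns.toList string.toList <;> cases lastOcc ns.toList string.toList <;> rfl
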